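-- pv_equiv track=rewrite | github.com/ramkishore-saravanan/Distributional-Thesaurus | dt_functions.py | similarity_count
-- ===== SOURCE A (Python) =====
-- def similarity_count(agg_per_feature, elements, context):
--     '''Step 9'''
--     similarity_count = {}
--
--     for c in agg_per_feature:
--         array = agg_per_feature[c]
--         for w1 in array:
--             for w2 in array:
--                 if w1 != w2 and w1 in array and w2 in array:
--                     if not w1 in similarity_count:
--                         similarity_count[w1] = {}
--                     if not w2 in similarity_count[w1]:
--                         similarity_count[w1][w2] = 1
--                     else:
--                         similarity_count[w1][w2] += 1
--
--     return similarity_count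
-- ===== SOURCE B (Python) =====
-- def _tally(words):
--     '''Multiplicity of each word in one feature's list, in first-occurrence order.'''
--     counts = {}
--     for w in words:
--         counts[w] = counts.get(w, 0) + 1
--     return counts
--
--
-- def _pair_products(counts):
--     '''All ordered pairs of distinct words with the product of their multiplicities.'''
--     items = list(counts.items())
--     return [(w1, w2, n1 * n2) for (w1, n1) in items for (w2, n2) in items if w1 != w2]
--
--
-- def similarity_count(agg_per_feature, elements, context):
--     '''Step 9 (alternative): per feature, tally multiplicities once, materialize the
--     weighted distinct-pair list, and accumulate each product in a single flat pass,
--     instead of scanning every ordered pair of positions and incrementing by 1.'''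
--     sim = {}
--     for c in agg_per_feature:
--         for w1, w2, p in _pair_products(_tally(agg_per_feature[c])):
--             row = sim.setdefault(w1, {})
--             row[w2] = row.get(w2, 0) + p
--     return sim
-- ===== Notes on version B (the rewrite author's own statement) =====
-- stated objective: alternative
-- what changed: Per feature, B tallies word multiplicities once, materializes a flat list of (w1, w2, n1*n2) triples over distinct ordered word pairs, and accumulates each product into the nested dict in one flat pass via setdefault, instead of A's triple nested loop over all ordered position pairs incrementing by 1 with membership tests and contains-branches.
import Mathlib
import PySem

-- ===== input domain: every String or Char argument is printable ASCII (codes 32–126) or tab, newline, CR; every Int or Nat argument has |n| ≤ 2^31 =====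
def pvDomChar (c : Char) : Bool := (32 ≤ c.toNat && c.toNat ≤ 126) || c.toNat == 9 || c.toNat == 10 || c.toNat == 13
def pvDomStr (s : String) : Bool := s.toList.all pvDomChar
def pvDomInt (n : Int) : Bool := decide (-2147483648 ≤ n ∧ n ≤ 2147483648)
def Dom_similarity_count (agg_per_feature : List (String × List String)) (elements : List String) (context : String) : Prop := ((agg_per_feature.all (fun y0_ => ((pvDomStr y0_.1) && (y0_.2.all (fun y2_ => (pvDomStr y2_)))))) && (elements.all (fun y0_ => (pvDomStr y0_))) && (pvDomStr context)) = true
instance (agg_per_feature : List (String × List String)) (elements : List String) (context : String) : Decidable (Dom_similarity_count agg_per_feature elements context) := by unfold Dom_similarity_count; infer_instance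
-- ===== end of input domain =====

-- B replaces A's per-feature triple loop over all ordered position pairs (incrementing by 1 behind
-- membership tests and contains-branches) with a multiplicity tally, a flat list of weighted
-- distinct-pair triples, and one accumulation pass over that list
-- (objective: alternative algorithm; same measured cost on the test inputs).

-- Both Pythons receive agg_per_feature as a dict; this normalizes the association list with
-- Python's dict(pairs) semantics (later value wins, key keeps its first position).
def pvToDict (pairs : List (String × List String)) : PySem.Dict String (List String) :=
  pairs.foldl (fun d p => d.insert p.1 p.2) PySem.Dict.empty

-- ===== PORT A =====
def similarity_count (agg_per_feature : List (String × List String)) (elements : List String) (context : String) : List (String × List (String × Int)) :=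
  let d := pvToDict agg_per_feature
  -- for c in agg_per_feature: array = agg_per_feature[c]; for w1 in array: for w2 in array: ...
  let sc : PySem.Dict String (PySem.Dict String Int) :=
    d.items.foldl (fun sc c =>
      let array := d.getD c.1 []   -- agg_per_feature[c]: c.1 is a key of d, so the lookup is exact (never KeyError)
      array.foldl (fun sc w1 =>
        array.foldl (fun sc w2 =>
          if w1 ≠ w2 ∧ w1 ∈ array ∧ w2 ∈ array then
            let sc1 := if sc.contains w1 then sc else sc.insert w1 PySem.Dict.empty
            let row := sc1.getD w1 PySem.Dict.empty
            if row.contains w2 then sc1.insert w1 (row.insert w2 (row.getD w2 0 + 1))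
            else sc1.insert w1 (row.insert w2 1)
          else sc) sc) sc) PySem.Dict.empty
  sc.items.map (fun p => (p.1, p.2.items))

-- ===== PORT B =====
-- def _tally(words): multiplicity of each word, in first-occurrence order
def pvTally (words : List String) : PySem.Dict String Int :=
  words.foldl (fun counts w => counts.insert w (counts.getD w 0 + 1)) PySem.Dict.empty

-- def _pair_products(counts): [(w1, w2, n1*n2) for (w1,n1) in items for (w2,n2) in items if w1 != w2]
def pvPairProducts (counts : PySem.Dict String Int) : List (String × String × Int) :=
  counts.items.flatMap (fun p1 =>
    (counts.items.filter (fun p2 => p1.1 != p2.1)).map (fun p2 => (p1.1, p2.1, p1.2 * p2.2)))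

def similarity_count_alt (agg_per_feature : List (String × List String)) (elements : List String) (context : String) : List (String × List (String × Int)) :=
  let d := pvToDict agg_per_feature
  -- for c in agg_per_feature: for w1, w2, p in _pair_products(_tally(agg_per_feature[c])):
  --   row = sim.setdefault(w1, {}); row[w2] = row.get(w2, 0) + p
  let sim : PySem.Dict String (PySem.Dict String Int) :=
    d.items.foldl (fun sim c =>
      (pvPairProducts (pvTally (d.getD c.1 []))).foldl (fun sim t =>
        let sim1 := sim.setdefault t.1 PySem.Dict.empty
        let row := sim1.getD t.1 PySem.Dict.empty
        sim1.insert t.1 (row.insert t.2.1 (row.getD t.2.1 0 + t.2.2))) sim) PySem.Dict.empty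
  sim.items.map (fun p => (p.1, p.2.items))

-- ===== PRECONDITION & SPEC =====
def Spec_similarity_count (agg_per_feature : List (String × List String)) (elements : List String) (context : String) (out : List (String × List (String × Int))) : Prop := out = similarity_count_alt agg_per_feature elements context
instance (agg_per_feature : List (String × List String)) (elements : List String) (context : String) (out : List (String × List (String × Int))) : Decidable (Spec_similarity_count agg_per_feature elements context out) := by unfold Spec_similarity_count; infer_instance

-- ===== CLAIM (what is proved, stated in full; the proofs are below) =====
def Claim_equal_similarity_count : Prop := ∀ (agg_per_feature : List (String × List String)) (elements : List String) (context : String), Dom_similarity_count agg_per_feature elements context → Spec_similarity_count agg_per_feature elements context (similarity_count agg_per_feature elements context)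

-- ===== LEMMAS AND PROOFS =====

theorem pv_setdefault_insert {ν : Type} (d : PySem.Dict String ν) (k : String) (v x : ν) :
    (d.setdefault k v).insert k x = d.insert k x := by
  by_cases h : d.contains k = true
  · rw [PySem.Dict.setdefault_of_contains d v h]
  · rw [PySem.Dict.setdefault_of_not_contains d v (by simpa using h),
        PySem.Dict.insert_insert_self]

theorem pv_getD_setdefault {ν : Type} (d : PySem.Dict String ν) (k : String) (v : ν) :
    (d.setdefault k v).getD k v = d.getD k v := by
  rw [PySem.Dict.getD_eq_get?_getD, PySem.Dict.get?_setdefault_self, PySem.Dict.getD_eq_get?_getD]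
  cases d.get? k <;> rfl

def pvBump (sc : PySem.Dict String (PySem.Dict String Int)) (u v : String) (k : Int) : PySem.Dict String (PySem.Dict String Int) :=
  sc.insert u ((sc.getD u PySem.Dict.empty).insert v ((sc.getD u PySem.Dict.empty).getD v 0 + k))

theorem pv_stepA_eq (sc : PySem.Dict String (PySem.Dict String Int)) (w1 w2 : String) :
    (let sc1 := if sc.contains w1 then sc else sc.insert w1 PySem.Dict.empty
     let row := sc1.getD w1 PySem.Dict.empty
     if row.contains w2 then sc1.insert w1 (row.insert w2 (row.getD w2 0 + 1))
     else sc1.insert w1 (row.insert w2 1)) = pvBump sc w1 w2 1 := by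
  have hsd : (if sc.contains w1 then sc else sc.insert w1 PySem.Dict.empty) = sc.setdefault w1 PySem.Dict.empty := by
    by_cases h : sc.contains w1 = true
    · rw [if_pos h, PySem.Dict.setdefault_of_contains sc _ h]
    · rw [if_neg h, PySem.Dict.setdefault_of_not_contains sc _ (by simpa using h)]
  simp only [hsd, pv_getD_setdefault, pv_setdefault_insert]
  by_cases h2 : (sc.getD w1 PySem.Dict.empty).contains w2 = true
  · rw [if_pos h2]; rfl
  · rw [if_neg h2]
    have h0 : (sc.getD w1 PySem.Dict.empty).getD w2 0 = 0 :=
      PySem.Dict.getD_of_not_contains _ _ (by simpa using h2)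
    unfold pvBump
    rw [h0]
    norm_num

theorem pv_stepB_eq (sc : PySem.Dict String (PySem.Dict String Int)) (w1 w2 : String) (n1 n2 : Int) :
    (let sc1 := sc.setdefault w1 PySem.Dict.empty
     let row := sc1.getD w1 PySem.Dict.empty
     sc1.insert w1 (row.insert w2 (row.getD w2 0 + n1 * n2))) = pvBump sc w1 w2 (n1 * n2) := by
  simp only [pv_getD_setdefault, pv_setdefault_insert]; rfl

theorem pv_insert_comm {ν : Type} (d : PySem.Dict String ν) {u v : String} (hne : u ≠ v)
    (hu : d.contains u = true) (x y : ν) :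
    (d.insert v y).insert u x = (d.insert u x).insert v y := by
  have huv : (d.insert v y).contains u = true := by
    rw [PySem.Dict.contains_insert]; simp [hu]
  have hvu : (d.insert u x).contains v = d.contains v := by
    rw [PySem.Dict.contains_insert]; simp [Ne.symm hne]
  apply PySem.Dict.ext
  rw [PySem.Dict.items_insert ((d.insert v y)) u x, huv, if_pos rfl]
  by_cases hv : d.contains v = true
  · rw [PySem.Dict.items_insert d v y, if_pos hv,
        PySem.Dict.items_insert (d.insert u x) v y, hvu, if_pos hv,
        PySem.Dict.items_insert d u x, if_pos hu, List.map_map, List.map_map]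
    apply List.map_congr_left
    intro p _
    simp only [Function.comp]
    by_cases hpv : p.1 = v
    · simp [hpv, Ne.symm hne, hne]
    · by_cases hpu : p.1 = u
      · simp [hpu, hne, hpv]
      · simp [hpv, hpu]
  · rw [PySem.Dict.items_insert d v y, if_neg hv,
        PySem.Dict.items_insert (d.insert u x) v y, hvu, if_neg hv,
        PySem.Dict.items_insert d u x, if_pos hu, List.map_append]
    simp [Ne.symm hne]

theorem pv_foldBump {ν : Type} (dflt : ν) (u : String) (h : ν → String → ν) :
    ∀ (F : List String) (sc : PySem.Dict String ν), F ≠ [] →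
      F.foldl (fun sc a => sc.insert u (h (sc.getD u dflt) a)) sc
        = sc.insert u (F.foldl h (sc.getD u dflt)) := by
  intro F
  induction F with
  | nil => intro sc hF; exact absurd rfl hF
  | cons a t IH =>
    intro sc _
    cases t with
    | nil => simp
    | cons b t' =>
      rw [List.foldl_cons, IH _ (by simp), PySem.Dict.getD_insert_self,
          PySem.Dict.insert_insert_self, List.foldl_cons]
      rfl

def pvOp {ν : Type} (dflt : ν) (g : String → ν → ν) (d : PySem.Dict String ν) (u : String) : PySem.Dict String ν :=
  d.insert u (g u (d.getD u dflt))

theorem pvOp_contains {ν : Type} (dflt : ν) (g : String → ν → ν) (d : PySem.Dict String ν) (u w : String)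
    (h : d.contains w = true) : (pvOp dflt g d u).contains w = true := by
  unfold pvOp; rw [PySem.Dict.contains_insert]; simp [h]

theorem pvOp_comm {ν : Type} (dflt : ν) (g : String → ν → ν) (d : PySem.Dict String ν) {u v : String}
    (hne : u ≠ v) (hu : d.contains u = true) :
    pvOp dflt g (pvOp dflt g d v) u = pvOp dflt g (pvOp dflt g d u) v := by
  unfold pvOp
  rw [PySem.Dict.getD_insert_of_ne _ _ _ hne, PySem.Dict.getD_insert_of_ne _ _ _ (Ne.symm hne)]
  exact pv_insert_comm d hne hu _ _

theorem pvOp_contains_self {ν : Type} (dflt : ν) (g : String → ν → ν) (d : PySem.Dict String ν) (u : String) :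
    (pvOp dflt g d u).contains u = true := by
  unfold pvOp; exact PySem.Dict.contains_insert_self _ _ _

theorem pvOp_iterate {ν : Type} (dflt : ν) (g : String → ν → ν) (u : String) :
    ∀ (n : ℕ) (d : PySem.Dict String ν) (x : ν),
      (fun d => pvOp dflt g d u)^[n] (d.insert u x) = d.insert u ((g u)^[n] x) := by
  intro n
  induction n with
  | zero => intro d x; rfl
  | succ n IH =>
    intro d x
    rw [Function.iterate_succ_apply]
    have h1 : pvOp dflt g (d.insert u x) u = d.insert u (g u x) := by
      unfold pvOp; rw [PySem.Dict.getD_insert_self, PySem.Dict.insert_insert_self]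
    rw [h1, IH, ← Function.iterate_succ_apply, Function.iterate_succ_apply]

theorem pvOp_iterate_comm {ν : Type} (dflt : ν) (g : String → ν → ν) {u v : String} (hne : u ≠ v) :
    ∀ (n : ℕ) (d : PySem.Dict String ν), d.contains u = true →
      (fun d => pvOp dflt g d u)^[n] (pvOp dflt g d v) = pvOp dflt g ((fun d => pvOp dflt g d u)^[n] d) v := by
  intro n
  induction n with
  | zero => intro d _; rfl
  | succ n IH =>
    intro d hu
    rw [Function.iterate_succ_apply, Function.iterate_succ_apply]
    show (fun d => pvOp dflt g d u)^[n] (pvOp dflt g (pvOp dflt g d v) u) = _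
    rw [pvOp_comm dflt g d hne hu, IH _ (pvOp_contains_self dflt g d u)]

theorem pvOp_pull {ν : Type} (dflt : ν) (g : String → ν → ν) (u : String) :
    ∀ (t : List String) (d : PySem.Dict String ν), d.contains u = true →
      t.foldl (pvOp dflt g) d
        = (t.filter (fun w => w ≠ u)).foldl (pvOp dflt g) ((fun d => pvOp dflt g d u)^[t.count u] d) := by
  intro t
  induction t with
  | nil => intro d _; rfl
  | cons a t IH =>
    intro d hu
    by_cases ha : a = u
    · subst ha
      rw [List.foldl_cons, IH _ (pvOp_contains_self dflt g d a)]
      have h1 : (fun d => pvOp dflt g d a)^[(a :: t).count a] d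
          = (fun d => pvOp dflt g d a)^[t.count a] (pvOp dflt g d a) := by
        rw [List.count_cons_self, Function.iterate_succ_apply]
      have h2 : (a :: t).filter (fun w => w ≠ a) = t.filter (fun w => w ≠ a) := by simp
      rw [h1, h2]
    · rw [List.foldl_cons, IH _ (pvOp_contains dflt g d a u hu)]
      have hcnt : (a :: t).count u = t.count u := by simp [List.count_cons, ha]
      rw [hcnt, pvOp_iterate_comm dflt g (fun h => ha h.symm) _ _ hu]
      have hf : (a :: t).filter (fun w => w ≠ u) = a :: t.filter (fun w => w ≠ u) := by
        simp [List.filter_cons, ha]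
      rw [hf, List.foldl_cons]

theorem pv_setadd_cons (u : String) :
    ∀ (t : List String) (s : List String), u ∉ s →
      t.foldl PySem.Set.add (u :: s) = u :: (t.filter (fun w => w ≠ u)).foldl PySem.Set.add s := by
  intro t
  induction t with
  | nil => intro s _; rfl
  | cons a t IH =>
    intro s hs
    by_cases ha : a = u
    · subst ha
      have h1 : PySem.Set.add (a :: s) a = a :: s := by
        simp [PySem.Set.add, PySem.Set.contains]
      rw [List.foldl_cons, h1]
      have h2 : (a :: t).filter (fun w => w ≠ a) = t.filter (fun w => w ≠ a) := by simp
      rw [h2, IH s hs]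
    · have h1 : PySem.Set.add (u :: s) a = u :: PySem.Set.add s a := by
        by_cases hmem : a ∈ s
        · simp [PySem.Set.add, PySem.Set.contains, List.contains_cons, hmem, ha]
        · simp [PySem.Set.add, PySem.Set.contains, List.contains_cons, hmem, ha]
      have h2 : u ∉ PySem.Set.add s a := by
        simp only [PySem.Set.mem_add]
        rintro (h | h)
        · exact hs h
        · exact ha h.symm
      have h3 : (a :: t).filter (fun w => w ≠ u) = a :: t.filter (fun w => w ≠ u) := by
        simp [List.filter_cons, ha]
      rw [List.foldl_cons, h1, IH _ h2, h3, List.foldl_cons]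

theorem pv_ofList_cons (u : String) (t : List String) :
    PySem.Set.ofList (u :: t) = u :: PySem.Set.ofList (t.filter (fun w => w ≠ u)) := by
  show (u :: t).foldl PySem.Set.add PySem.Set.empty = _
  rw [List.foldl_cons]
  have h1 : PySem.Set.add PySem.Set.empty u = [u] := rfl
  rw [h1]
  exact pv_setadd_cons u t [] (by simp)

theorem pv_groupFold {ν : Type} (dflt : ν) (g : String → ν → ν) :
    ∀ (n : ℕ) (xs : List String), xs.length ≤ n → ∀ (d : PySem.Dict String ν),
      xs.foldl (pvOp dflt g) d
        = (PySem.Set.ofList xs).foldl (fun d u => d.insert u ((g u)^[xs.count u] (d.getD u dflt))) d := by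
  intro n
  induction n with
  | zero =>
    intro xs h d
    have : xs = [] := List.length_eq_zero_iff.mp (Nat.le_zero.mp h)
    subst this; rfl
  | succ n IH =>
    intro xs h d
    cases xs with
    | nil => rfl
    | cons u t =>
      rw [List.foldl_cons]
      have hstep : pvOp dflt g d u = d.insert u (g u (d.getD u dflt)) := rfl
      rw [pvOp_pull dflt g u t _ (pvOp_contains_self dflt g d u), hstep,
          pvOp_iterate dflt g u _ _ _]
      have hcnt1 : (g u)^[t.count u] (g u (d.getD u dflt)) = (g u)^[(u :: t).count u] (d.getD u dflt) := by
        rw [List.count_cons_self, ← Function.iterate_succ_apply]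
      rw [hcnt1]
      set t' := t.filter (fun w => w ≠ u) with ht'
      have hlen : t'.length ≤ n := le_trans (List.length_filter_le _ _) (by simpa using h)
      rw [IH t' hlen]
      rw [pv_ofList_cons u t, List.foldl_cons]
      refine PySem.List.foldl_congr_mem _ _ _ _ ?_
      intro acc v hv
      have hvt' : v ∈ t' := (PySem.Set.mem_ofList _ _).mp hv
      have hvne : v ≠ u := by
        have := List.of_mem_filter hvt'
        simpa using this
      have hc1 : List.count v (u :: t) = List.count v t := by simp [List.count_cons, Ne.symm hvne]
      have hc2 : List.count v t' = List.count v t := by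
        rw [ht']; exact List.count_filter (by simpa using hvne)
      rw [hc2, hc1]

def pvAddM (E : List String) (row : PySem.Dict String Int) (m : String → Int) : PySem.Dict String Int :=
  E.foldl (fun row v => row.insert v (row.getD v 0 + m v)) row

theorem pv_getD_addM_not_mem {v : String} (E : List String) (hv : v ∉ E) :
    ∀ (row : PySem.Dict String Int) (m : String → Int), (pvAddM E row m).getD v 0 = row.getD v 0 := by
  induction E with
  | nil => intro row m; rfl
  | cons w E IH =>
    intro row m
    have hw : v ≠ w := fun h => hv (h ▸ List.mem_cons_self ..)
    show (pvAddM E (row.insert w _) m).getD v 0 = _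
    rw [IH (fun h => hv (List.mem_cons_of_mem _ h)), PySem.Dict.getD_insert_of_ne _ _ _ hw]

theorem pv_insert_addM_comm {v : String} (E : List String) (hv : v ∉ E) :
    ∀ (row : PySem.Dict String Int) (m : String → Int) (y : Int), row.contains v = true →
      (pvAddM E row m).insert v y = pvAddM E (row.insert v y) m := by
  induction E with
  | nil => intro row m y _; rfl
  | cons w E IH =>
    intro row m y hc
    have hw : v ≠ w := fun h => hv (h ▸ List.mem_cons_self ..)
    have hv' : v ∉ E := fun h => hv (List.mem_cons_of_mem _ h)
    show (pvAddM E (row.insert w _) m).insert v y = pvAddM E ((row.insert v y).insert w _) m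
    rw [IH hv' _ m y (by rw [PySem.Dict.contains_insert]; simp [hc])]
    have hgd : (row.insert v y).getD w 0 = row.getD w 0 :=
      PySem.Dict.getD_insert_of_ne _ _ _ (Ne.symm hw)
    rw [hgd]
    congr 1
    exact pv_insert_comm row hw hc _ _

theorem pv_addM_addM (E : List String) (hE : E.Nodup) :
    ∀ (row : PySem.Dict String Int) (m m' : String → Int),
      pvAddM E (pvAddM E row m) m' = pvAddM E row (fun v => m v + m' v) := by
  induction E with
  | nil => intro row m m'; rfl
  | cons v E IH =>
    intro row m m'
    have hv : v ∉ E := (List.nodup_cons.mp hE).1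
    have hE' : E.Nodup := (List.nodup_cons.mp hE).2
    show pvAddM E ((pvAddM E (row.insert v (row.getD v 0 + m v)) m).insert v
        ((pvAddM E (row.insert v (row.getD v 0 + m v)) m).getD v 0 + m' v)) m' = _
    rw [pv_getD_addM_not_mem E hv, PySem.Dict.getD_insert_self,
        pv_insert_addM_comm E hv _ m _ (PySem.Dict.contains_insert_self _ _ _),
        PySem.Dict.insert_insert_self, IH hE']
    show pvAddM E (row.insert v (row.getD v 0 + m v + m' v)) _
        = pvAddM E (row.insert v (row.getD v 0 + (m v + m' v))) _
    rw [add_assoc]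

theorem pv_addM_iterate (E : List String) (hE : E.Nodup) :
    ∀ (n : ℕ) (row : PySem.Dict String Int) (m : String → Int),
      (fun row => pvAddM E row m)^[n + 1] row = pvAddM E row (fun v => ((n : Int) + 1) * m v) := by
  intro n
  induction n with
  | zero =>
    intro row m
    show pvAddM E row m = _
    unfold pvAddM
    refine PySem.List.foldl_congr_mem _ _ _ _ ?_
    intro acc v _
    norm_num
  | succ n IH =>
    intro row m
    rw [Function.iterate_succ_apply]
    show (fun row => pvAddM E row m)^[n + 1] (pvAddM E row m) = _
    rw [IH, pv_addM_addM E hE]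
    unfold pvAddM
    refine PySem.List.foldl_congr_mem _ _ _ _ ?_
    intro acc v _
    push_cast
    ring_nf

theorem pv_iterate_add_one : ∀ (n : ℕ) (x : Int), (fun x : Int => x + 1)^[n] x = x + n := by
  intro n
  induction n with
  | zero => intro x; simp
  | succ n IH =>
    intro x
    rw [Function.iterate_succ_apply, IH]
    push_cast; ring

theorem pv_ofList_filter_aux (p : String → Bool) :
    ∀ (xs : List String) (s : List String),
      (xs.filter p).foldl PySem.Set.add (s.filter p) = (xs.foldl PySem.Set.add s).filter p := by
  intro xs
  induction xs with
  | nil => intro s; rfl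
  | cons x t IH =>
    intro s
    by_cases hp : p x = true
    · have hadd : (PySem.Set.add s x).filter p = PySem.Set.add (s.filter p) x := by
        by_cases hmem : x ∈ s
        · simp [PySem.Set.add, PySem.Set.contains, List.elem_eq_contains, hmem,
            List.mem_filter, hp]
        · simp [PySem.Set.add, PySem.Set.contains, List.elem_eq_contains, hmem,
            List.mem_filter, hp, List.filter_append]
      rw [List.filter_cons_of_pos hp, List.foldl_cons, List.foldl_cons, ← IH, hadd]
    · have hadd : (PySem.Set.add s x).filter p = s.filter p := by
        by_cases hmem : x ∈ s
        · simp [PySem.Set.add, PySem.Set.contains, List.elem_eq_contains, hmem]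
        · simp [PySem.Set.add, PySem.Set.contains, List.elem_eq_contains, hmem,
            List.filter_append, hp]
      rw [List.filter_cons_of_neg (by simpa using hp), List.foldl_cons, ← IH, hadd]

theorem pv_ofList_filter (p : String → Bool) (xs : List String) :
    PySem.Set.ofList (xs.filter p) = (PySem.Set.ofList xs).filter p := by
  have := pv_ofList_filter_aux p xs []
  simpa [PySem.Set.ofList, PySem.Set.empty] using this

def pvGA (xs : List String) (w1 : String) (row : PySem.Dict String Int) : PySem.Dict String Int :=
  (xs.filter (fun w2 => w1 ≠ w2)).foldl (fun row w2 => row.insert w2 (row.getD w2 0 + 1)) row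

def pvGB (xs : List String) (v : String) (row : PySem.Dict String Int) : PySem.Dict String Int :=
  pvAddM ((PySem.Set.ofList xs).filter (fun w => v ≠ w)) row
    (fun w => (xs.count v : Int) * (xs.count w : Int))

theorem pv_row_eq (xs : List String) (u : String) (hu : u ∈ xs) (row : PySem.Dict String Int) :
    (pvGA xs u)^[xs.count u] row = pvGB xs u row := by
  have hE : ((PySem.Set.ofList xs).filter (fun w => u ≠ w)).Nodup :=
    (PySem.Set.nodup_ofList xs).filter _
  have hgA : pvGA xs u = fun row => pvAddM ((PySem.Set.ofList xs).filter (fun w => u ≠ w)) row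
      (fun w => ((xs.filter (fun w2 => u ≠ w2)).count w : Int)) := by
    funext row
    show (xs.filter (fun w2 => u ≠ w2)).foldl (pvOp 0 (fun _ x => x + 1)) row = _
    rw [pv_groupFold 0 (fun _ x => x + 1) (xs.filter (fun w2 => u ≠ w2)).length _ le_rfl row,
        pv_ofList_filter]
    unfold pvAddM
    refine PySem.List.foldl_congr_mem _ _ _ _ ?_
    intro acc v _
    rw [pv_iterate_add_one]
  obtain ⟨k, hk⟩ : ∃ k, xs.count u = k + 1 := by
    have := List.count_pos_iff.mpr hu
    exact ⟨xs.count u - 1, by omega⟩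
  rw [hgA, hk, pv_addM_iterate _ hE k row _]
  unfold pvGB pvAddM
  refine PySem.List.foldl_congr_mem _ _ _ _ ?_
  intro acc v hv
  have hvne : u ≠ v := by
    have := List.of_mem_filter hv
    simpa using this
  have hcf : (xs.filter (fun w2 => u ≠ w2)).count v = xs.count v :=
    List.count_filter (by simpa using hvne)
  simp only [hcf, hk]
  push_cast
  ring_nf

-- A's per-feature triple loop equals the double fold over Counter items with if-guarded bumps.
theorem pv_feature_eq (xs : List String) (sc : PySem.Dict String (PySem.Dict String Int)) :
    xs.foldl (fun sc w1 =>
      xs.foldl (fun sc w2 =>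
        if w1 ≠ w2 ∧ w1 ∈ xs ∧ w2 ∈ xs then
          let sc1 := if sc.contains w1 then sc else sc.insert w1 PySem.Dict.empty
          let row := sc1.getD w1 PySem.Dict.empty
          if row.contains w2 then sc1.insert w1 (row.insert w2 (row.getD w2 0 + 1))
          else sc1.insert w1 (row.insert w2 1)
        else sc) sc) sc
    =
    (PySem.Dict.counter xs).items.foldl (fun sc p1 =>
        (PySem.Dict.counter xs).items.foldl (fun sc p2 =>
          if p1.1 ≠ p2.1 then pvBump sc p1.1 p2.1 (p1.2 * p2.2)
          else sc) sc) sc := by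
  by_cases hdeg : ∀ a ∈ xs, ∀ b ∈ xs, a = b
  · -- every feature word is the same: both loops never fire
    have hmemB : ∀ p ∈ (PySem.Dict.counter xs).items, p.1 ∈ xs := by
      intro p hp
      rw [PySem.Dict.items_counter] at hp
      obtain ⟨w, hw, rfl⟩ := List.mem_map.mp hp
      exact (PySem.Set.mem_ofList xs w).mp hw
    have hA : xs.foldl (fun sc w1 =>
        xs.foldl (fun sc w2 =>
          if w1 ≠ w2 ∧ w1 ∈ xs ∧ w2 ∈ xs then
            let sc1 := if sc.contains w1 then sc else sc.insert w1 PySem.Dict.empty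
            let row := sc1.getD w1 PySem.Dict.empty
            if row.contains w2 then sc1.insert w1 (row.insert w2 (row.getD w2 0 + 1))
            else sc1.insert w1 (row.insert w2 1)
          else sc) sc) sc = sc := by
      refine Eq.trans (PySem.List.foldl_congr_mem _ _ (fun acc _ => acc) _ ?_)
        (PySem.List.foldl_ignore _ _)
      intro acc w1 hw1
      refine Eq.trans (PySem.List.foldl_congr_mem _ _ (fun acc _ => acc) _ ?_)
        (PySem.List.foldl_ignore _ _)
      intro acc2 w2 hw2
      rw [if_neg]
      rintro ⟨h, -, -⟩
      exact h (hdeg _ hw1 _ hw2)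
    have hB : (PySem.Dict.counter xs).items.foldl (fun sc p1 =>
        (PySem.Dict.counter xs).items.foldl (fun sc p2 =>
          if p1.1 ≠ p2.1 then pvBump sc p1.1 p2.1 (p1.2 * p2.2)
          else sc) sc) sc = sc := by
      refine Eq.trans (PySem.List.foldl_congr_mem _ _ (fun acc _ => acc) _ ?_)
        (PySem.List.foldl_ignore _ _)
      intro acc p1 hp1
      refine Eq.trans (PySem.List.foldl_congr_mem _ _ (fun acc _ => acc) _ ?_)
        (PySem.List.foldl_ignore _ _)
      intro acc2 p2 hp2
      rw [if_neg]
      intro h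
      exact h (hdeg _ (hmemB _ hp1) _ (hmemB _ hp2))
    rw [hA, hB]
  · push_neg at hdeg
    obtain ⟨a, ha, b, hb, hab⟩ := hdeg
    have hpartner : ∀ u : String, ∃ c ∈ xs, u ≠ c := by
      intro u
      by_cases h : u = a
      · exact ⟨b, hb, h ▸ hab⟩
      · exact ⟨a, ha, h⟩
    -- A side: collapse to one read-modify-write per outer word, then group
    have hA : xs.foldl (fun sc w1 =>
        xs.foldl (fun sc w2 =>
          if w1 ≠ w2 ∧ w1 ∈ xs ∧ w2 ∈ xs then
            let sc1 := if sc.contains w1 then sc else sc.insert w1 PySem.Dict.empty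
            let row := sc1.getD w1 PySem.Dict.empty
            if row.contains w2 then sc1.insert w1 (row.insert w2 (row.getD w2 0 + 1))
            else sc1.insert w1 (row.insert w2 1)
          else sc) sc) sc
        = xs.foldl (pvOp PySem.Dict.empty (pvGA xs)) sc := by
      refine PySem.List.foldl_congr_mem _ _ _ _ ?_
      intro acc w1 hw1
      have h1 : xs.foldl (fun sc w2 =>
          if w1 ≠ w2 ∧ w1 ∈ xs ∧ w2 ∈ xs then
            let sc1 := if sc.contains w1 then sc else sc.insert w1 PySem.Dict.empty
            let row := sc1.getD w1 PySem.Dict.empty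
            if row.contains w2 then sc1.insert w1 (row.insert w2 (row.getD w2 0 + 1))
            else sc1.insert w1 (row.insert w2 1)
          else sc) acc
          = xs.foldl (fun sc w2 => if w1 ≠ w2 then pvBump sc w1 w2 1 else sc) acc := by
        refine PySem.List.foldl_congr_mem _ _ _ _ ?_
        intro acc2 w2 hw2
        by_cases hne : w1 ≠ w2
        · rw [if_pos ⟨hne, hw1, hw2⟩, if_pos hne]
          exact pv_stepA_eq acc2 w1 w2
        · rw [if_neg (by tauto), if_neg hne]
      rw [h1, PySem.List.foldl_ite_eq_foldl_filter (fun w2 => w1 ≠ w2)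
        (fun sc w2 => pvBump sc w1 w2 1) xs acc]
      obtain ⟨c, hc, hcne⟩ := hpartner w1
      have hFne : xs.filter (fun w2 => w1 ≠ w2) ≠ [] :=
        List.ne_nil_of_mem (List.mem_filter.mpr ⟨hc, by simpa using hcne⟩)
      exact pv_foldBump PySem.Dict.empty w1
        (fun row w2 => row.insert w2 (row.getD w2 0 + 1)) _ acc hFne
    rw [hA, pv_groupFold PySem.Dict.empty (pvGA xs) xs.length xs le_rfl sc]
    -- counter side: one bulk write per distinct word
    rw [PySem.Dict.items_counter, List.foldl_map]
    refine PySem.List.foldl_congr_mem _ _ _ _ ?_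
    intro acc u hu
    rw [pv_row_eq xs u ((PySem.Set.mem_ofList xs u).mp hu) (acc.getD u PySem.Dict.empty)]
    -- reduce the counter double fold's inner loop for p1 = (u, count u xs)
    rw [PySem.List.foldl_ite_eq_foldl_filter (fun p2 : String × Int => u ≠ p2.1)
      (fun sc p2 => pvBump sc u p2.1 ((xs.count u : Int) * p2.2)) _ acc,
      List.filter_map, List.foldl_map]
    obtain ⟨c, hc, hcne⟩ := hpartner u
    have hcm : c ∈ List.filter ((fun p2 : String × Int => decide (u ≠ p2.1)) ∘
        (fun k => (k, (xs.count k : Int)))) (PySem.Set.ofList xs) :=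
      List.mem_filter.mpr ⟨(PySem.Set.mem_ofList xs c).mpr hc, by simpa using hcne⟩
    exact (pv_foldBump PySem.Dict.empty u
      (fun row w => row.insert w (row.getD w 0 + (xs.count u : Int) * (xs.count w : Int))) _ acc
      (List.ne_nil_of_mem hcm)).symm

-- pvTally is collections.Counter
theorem pv_tally_eq_counter (xs : List String) : pvTally xs = PySem.Dict.counter xs :=
  PySem.Dict.foldl_insert_getD_add_one_eq_counter xs

-- B's flat pass over the triple list equals the double fold over Counter items with if-guarded bumps.
theorem pv_flat_eq (xs : List String) (sc : PySem.Dict String (PySem.Dict String Int)) :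
    (pvPairProducts (pvTally xs)).foldl (fun sim t =>
        let sim1 := sim.setdefault t.1 PySem.Dict.empty
        let row := sim1.getD t.1 PySem.Dict.empty
        sim1.insert t.1 (row.insert t.2.1 (row.getD t.2.1 0 + t.2.2))) sc
    =
    (PySem.Dict.counter xs).items.foldl (fun sc p1 =>
        (PySem.Dict.counter xs).items.foldl (fun sc p2 =>
          if p1.1 ≠ p2.1 then pvBump sc p1.1 p2.1 (p1.2 * p2.2)
          else sc) sc) sc := by
  rw [pv_tally_eq_counter]
  unfold pvPairProducts
  rw [List.foldl_flatMap]
  refine PySem.List.foldl_congr_mem _ _ _ _ ?_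
  intro acc p1 _
  rw [List.foldl_map, ← PySem.List.foldl_if_eq_foldl_filter (fun p2 : String × Int => p1.1 != p2.1)]
  refine PySem.List.foldl_congr_mem _ _ _ _ ?_
  intro acc2 p2 _
  by_cases h : p1.1 = p2.1
  · rw [if_neg (by simp [h]), if_neg (by simp [h])]
  · rw [if_pos (by simpa using h), if_pos h]
    exact pv_stepB_eq acc2 p1.1 p2.1 p1.2 p2.2

-- ===== VERDICT (by name: the statement is the Claim_ definition above) =====
theorem similarity_count_spec : Claim_equal_similarity_count := by
  intro agg_per_feature elements context _
  unfold Spec_similarity_count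
  simp only [similarity_count, similarity_count_alt]
  refine congrArg (fun sc : PySem.Dict String (PySem.Dict String Int) => sc.items.map (fun p => (p.1, p.2.items))) ?_
  refine PySem.List.foldl_congr_mem _ _ _ _ ?_
  intro sc c _
  rw [pv_feature_eq (pvToDict agg_per_feature |>.getD c.1 []) sc,
      pv_flat_eq (pvToDict agg_per_feature |>.getD c.1 []) sc]
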